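-- pv_equiv track=rewrite | github.com/Dumitrescu-Alexandru/FMG | test_utils.py | reorder_inds_get_bnd_numbers
-- ===== SOURCE A (Python) =====
-- def reorder_inds_get_bnd_numbers(unique_bnds, actual_bnd):
--     ind = 0
--     indices = []
--     bnd2count = {u:0 for u in unique_bnds}
--     for b in unique_bnds:
--         for ind, b_ in enumerate(actual_bnd):
--             if b_[2] == b: bnd2count[b]+=1; indices.append(ind)
--     return bnd2count, indices
-- ===== SOURCE B (Python) =====
-- def reorder_inds_get_bnd_numbers(unique_bnds, actual_bnd):
--     groups = {}
--     for i, b_ in enumerate(actual_bnd):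
--         groups.setdefault(b_[2], []).append(i)
--     bnd2count = {u: 0 for u in unique_bnds}
--     indices = []
--     for b in unique_bnds:
--         idxs = groups.get(b, [])
--         bnd2count[b] += len(idxs)
--         indices += idxs
--     return bnd2count, indices
-- ===== Notes on version B (the rewrite author's own statement) =====
-- stated objective: faster
-- what changed: B replaces A's per-label rescan of actual_bnd (one full enumerate pass per unique label) by a single grouping pass building a dict label->list of indices, then assembles counts and indices per label by dictionary lookup.
import Mathlib
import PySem

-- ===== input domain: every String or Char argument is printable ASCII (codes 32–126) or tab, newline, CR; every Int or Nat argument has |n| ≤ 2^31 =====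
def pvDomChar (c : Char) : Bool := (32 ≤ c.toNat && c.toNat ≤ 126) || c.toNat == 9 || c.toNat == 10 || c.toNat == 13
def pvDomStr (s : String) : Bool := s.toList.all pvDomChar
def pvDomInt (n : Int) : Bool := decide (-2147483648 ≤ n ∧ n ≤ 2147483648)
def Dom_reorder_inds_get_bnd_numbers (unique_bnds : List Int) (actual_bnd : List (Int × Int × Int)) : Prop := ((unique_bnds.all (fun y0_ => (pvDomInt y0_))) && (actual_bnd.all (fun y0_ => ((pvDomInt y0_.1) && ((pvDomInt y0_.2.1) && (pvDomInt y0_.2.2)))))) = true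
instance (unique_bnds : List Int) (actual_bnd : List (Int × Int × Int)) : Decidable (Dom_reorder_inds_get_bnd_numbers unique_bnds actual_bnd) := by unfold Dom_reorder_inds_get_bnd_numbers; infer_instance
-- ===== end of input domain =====

-- ===== PORT A =====
-- B replaces A's U-fold rescans of actual_bnd by one grouping pass (objective: faster, O(U*N) -> O(U+N)).
-- Port of A: dict comprehension {u:0 ...}, then nested for-loops appending indices / incrementing counts.
def reorder_inds_get_bnd_numbers (unique_bnds : List Int) (actual_bnd : List (Int × Int × Int)) :
    (List (Int × Int)) × List Int :=
  let bnd2count : PySem.Dict Int Int :=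
    unique_bnds.foldl (fun d u => d.insert u 0) PySem.Dict.empty
  let st :=
    unique_bnds.foldl (fun (st : PySem.Dict Int Int × List Int) b =>
      (PySem.List.enumerate actual_bnd).foldl (fun st p =>
        if p.2.2.2 == b then (st.1.modify b 0 (· + 1), st.2 ++ [p.1]) else st) st)
      (bnd2count, ([] : List Int))
  (st.1.items, st.2)

-- ===== PORT B =====
-- groups.setdefault(b_[2], []).append(i)  ==  groups[b_[2]] = groups.get(b_[2], []) + [i]  (insertion position kept)
def pvGroups (actual_bnd : List (Int × Int × Int)) : PySem.Dict Int (List Int) :=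
  (PySem.List.enumerate actual_bnd).foldl
    (fun g p => g.modify p.2.2.2 [] (· ++ [p.1])) PySem.Dict.empty

def reorder_inds_get_bnd_numbers_alt (unique_bnds : List Int) (actual_bnd : List (Int × Int × Int)) :
    (List (Int × Int)) × List Int :=
  let groups := pvGroups actual_bnd
  let bnd2count : PySem.Dict Int Int :=
    unique_bnds.foldl (fun d u => d.insert u 0) PySem.Dict.empty
  let st :=
    unique_bnds.foldl (fun (st : PySem.Dict Int Int × List Int) b =>
      let idxs := groups.getD b []
      (st.1.modify b 0 (· + (idxs.length : Int)), st.2 ++ idxs))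
      (bnd2count, ([] : List Int))
  (st.1.items, st.2)

-- ===== PRECONDITION & SPEC =====
def Spec_reorder_inds_get_bnd_numbers (unique_bnds : List Int) (actual_bnd : List (Int × Int × Int)) (out : (List (Int × Int)) × List Int) : Prop := out = reorder_inds_get_bnd_numbers_alt unique_bnds actual_bnd
instance (unique_bnds : List Int) (actual_bnd : List (Int × Int × Int)) (out : (List (Int × Int)) × List Int) : Decidable (Spec_reorder_inds_get_bnd_numbers unique_bnds actual_bnd out) := by unfold Spec_reorder_inds_get_bnd_numbers; infer_instance

-- ===== CLAIM (what is proved, stated in full; the proofs are below) =====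
def Claim_equal_reorder_inds_get_bnd_numbers : Prop := ∀ (unique_bnds : List Int) (actual_bnd : List (Int × Int × Int)), Dom_reorder_inds_get_bnd_numbers unique_bnds actual_bnd → Spec_reorder_inds_get_bnd_numbers unique_bnds actual_bnd (reorder_inds_get_bnd_numbers unique_bnds actual_bnd)

-- ===== LEMMAS AND PROOFS =====

-- modify is definitionally an insert of the modified value
theorem pv_modify_eq_insert (d : PySem.Dict Int Int) (k : Int) (d0 : Int) (f : Int → Int) :
    d.modify k d0 f = d.insert k (f (d.getD k d0)) := PySem.Dict.ext_iff.mpr rfl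

-- re-inserting the present value is a no-op (keys unique)
theorem pv_insert_getD_self (d : PySem.Dict Int Int) (k : Int) (d0 : Int)
    (hc : d.contains k = true) (hnd : d.keys.Nodup) : d.insert k (d.getD k d0) = d := by
  apply PySem.Dict.ext
  rw [PySem.Dict.items_insert_of_contains _ _ hc]
  conv_rhs => rw [← List.map_id d.items]
  apply List.map_congr_left
  intro p hp
  by_cases h : p.1 = k
  · have : (k, p.2) ∈ d.items := by rw [← h]; exact hp
    have hval := PySem.Dict.getD_of_mem_items _ this hnd (d0 := d0)
    simp only [h, BEq.rfl, if_true, hval, id]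
    exact Prod.ext h.symm rfl
  · simp [h]

-- the grouping dict of B looks up exactly the filtered indices
theorem pv_groups_getD (actual_bnd : List (Int × Int × Int)) (b : Int) :
    (pvGroups actual_bnd).getD b []
      = ((PySem.List.enumerate actual_bnd).filter (fun p => p.2.2.2 == b)).map (·.1) := by
  unfold pvGroups
  have h := PySem.Dict.getD_foldl_modify_append
      (l := (PySem.List.enumerate actual_bnd).map (fun p => (p.2.2.2, p.1)))
      (d := (PySem.Dict.empty : PySem.Dict Int (List Int))) (c := b)
  rw [List.foldl_map] at h
  simp only [h, PySem.Dict.getD_empty, List.nil_append, List.filter_map, List.map_map]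
  rfl

-- A's inner scan, dict component: it increments the counter count-many times
theorem pv_innerA_dict (b : Int) :
    ∀ (l : List (Int × (Int × Int × Int))) (d : PySem.Dict Int Int),
      d.contains b = true → d.keys.Nodup →
      l.foldl (fun d p => if p.2.2.2 == b then d.modify b 0 (· + 1) else d) d
        = d.insert b (d.getD b 0 + (l.countP (fun p => p.2.2.2 == b) : Int))
  | [], d, hc, hnd => by
      simp [pv_insert_getD_self d b 0 hc hnd]
  | p :: l, d, hc, hnd => by
      cases hb : (p.2.2.2 == b) with
      | true =>
        have hrec := pv_innerA_dict b l (d.insert b (d.getD b 0 + 1))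
          (PySem.Dict.contains_insert_self d b _)
          (PySem.Dict.nodup_keys_insert _ _ _ hnd)
        simp only [List.foldl_cons, List.countP_cons, hb, if_true]
        rw [pv_modify_eq_insert d]
        simp only [hrec, PySem.Dict.getD_insert_self, PySem.Dict.insert_insert_self]
        congr 1
        push_cast
        ring
      | false =>
        have hrec := pv_innerA_dict b l d hc hnd
        simp only [List.foldl_cons, List.countP_cons, hb, Bool.false_eq_true, if_false, hrec,
          Nat.add_zero]

-- A's inner scan splits into its dict fold and an index-append fold
theorem pv_innerA_split (b : Int) :
    ∀ (l : List (Int × (Int × Int × Int))) (st : PySem.Dict Int Int × List Int),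
      l.foldl (fun st p =>
          if p.2.2.2 == b then (st.1.modify b 0 (· + 1), st.2 ++ [p.1]) else st) st
        = (l.foldl (fun d p => if p.2.2.2 == b then d.modify b 0 (· + 1) else d) st.1,
           st.2 ++ (l.filter (fun p => p.2.2.2 == b)).map (·.1))
  | [], st => by simp
  | p :: l, st => by
      cases hb : (p.2.2.2 == b) with
      | true =>
        simp only [List.foldl_cons, List.filter_cons, hb, if_true, pv_innerA_split b l]
        simp
      | false =>
        simp only [List.foldl_cons, List.filter_cons, hb, Bool.false_eq_true, if_false,
          pv_innerA_split b l]

-- the outer loops of A and B agree, given the counter dict contains every remaining label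
theorem pv_outer (actual_bnd : List (Int × Int × Int)) :
    ∀ (ub : List Int) (st : PySem.Dict Int Int × List Int),
      st.1.keys.Nodup → (∀ k ∈ ub, st.1.contains k = true) →
      ub.foldl (fun (st : PySem.Dict Int Int × List Int) b =>
          (PySem.List.enumerate actual_bnd).foldl (fun st p =>
            if p.2.2.2 == b then (st.1.modify b 0 (· + 1), st.2 ++ [p.1]) else st) st) st
        = ub.foldl (fun (st : PySem.Dict Int Int × List Int) b =>
            let idxs := (pvGroups actual_bnd).getD b []
            (st.1.modify b 0 (· + (idxs.length : Int)), st.2 ++ idxs)) st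
  | [], st, _, _ => rfl
  | b :: ub, st, hnd, hcont => by
      have hb : st.1.contains b = true := hcont b (List.mem_cons_self ..)
      simp only [List.foldl_cons]
      rw [pv_innerA_split b, pv_innerA_dict b _ st.1 hb hnd]
      rw [pv_outer actual_bnd ub _ (PySem.Dict.nodup_keys_insert _ _ _ hnd)
        (fun k hk => by
          rw [PySem.Dict.contains_insert]
          simp [hcont k (List.mem_cons_of_mem _ hk)])]
      congr 2
      rw [pv_modify_eq_insert, pv_groups_getD]
      congr 2
      · simp [List.countP_eq_length_filter]
      · rw [pv_groups_getD]

-- the initial counter dict has unique keys and contains every label of unique_bnds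
theorem pv_init_keys (unique_bnds : List Int) :
    (unique_bnds.foldl (fun d u => d.insert u 0) (PySem.Dict.empty : PySem.Dict Int Int)).keys.Nodup
    ∧ ∀ k ∈ unique_bnds,
        (unique_bnds.foldl (fun d u => d.insert u 0) (PySem.Dict.empty : PySem.Dict Int Int)).contains k = true := by
  constructor
  · exact PySem.Dict.nodup_keys_foldl_insert unique_bnds _ _ PySem.Dict.nodup_keys_empty
  · intro k hk
    rw [PySem.Dict.contains_iff_mem_keys, PySem.Dict.keys_foldl_insert]
    simpa [PySem.Dict.keys] using Or.inr hk

-- ===== VERDICT (by name: the statement is the Claim_ definition above) =====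
theorem reorder_inds_get_bnd_numbers_spec : Claim_equal_reorder_inds_get_bnd_numbers := by
  intro unique_bnds actual_bnd _
  unfold Spec_reorder_inds_get_bnd_numbers
  dsimp only [reorder_inds_get_bnd_numbers, reorder_inds_get_bnd_numbers_alt]
  obtain ⟨hnd, hcont⟩ := pv_init_keys unique_bnds
  rw [pv_outer actual_bnd unique_bnds _ hnd hcont]
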